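-- pv_equiv track=rewrite | github.com/Danial968/Codestepbystep | count_to_by.py | helper
-- ===== SOURCE A (Python) =====
-- def helper(number,step,result):
--
--     result = ''
--     if number <= 0 or step == 0:
--         return result
--     result = ', ' + str(number)
--     number -= step
--     result = helper(number,step,result) + result
--
--     return result
-- ===== SOURCE B (Python) =====
-- def helper(number, step, result):
--     # Iterative re-implementation: collect the descending values, then join
--     # them (ascending) with ', ' behind a leading ', '.
--     result = ''
--     if number <= 0 or step == 0:
--         return result
--     vals = []
--     n = number
--     while n > 0:
--         vals.append(n)
--         n -= step
--     return ', ' + ', '.join(str(v) for v in reversed(vals))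
-- ===== Notes on version B (the rewrite author's own statement) =====
-- stated objective: simpler
-- what changed: Replaces A's recursion-with-string-prepending by a single iterative loop that collects the values and one ', '.join over the reversed list.
import Mathlib
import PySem

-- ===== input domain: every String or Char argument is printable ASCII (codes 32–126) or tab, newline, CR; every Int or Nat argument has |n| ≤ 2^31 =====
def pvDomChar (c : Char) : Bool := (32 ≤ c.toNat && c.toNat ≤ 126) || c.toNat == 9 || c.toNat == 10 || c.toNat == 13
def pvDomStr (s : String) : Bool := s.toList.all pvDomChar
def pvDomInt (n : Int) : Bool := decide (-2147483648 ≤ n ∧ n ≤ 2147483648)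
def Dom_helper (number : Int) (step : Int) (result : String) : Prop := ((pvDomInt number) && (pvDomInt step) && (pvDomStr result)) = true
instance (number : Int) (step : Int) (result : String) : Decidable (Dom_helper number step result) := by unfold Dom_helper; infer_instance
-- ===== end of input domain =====

-- B is a simpler iterative decomposition: collect the positive values, reverse, one join.
-- Equivalence is about the RETURN value; both versions ignore and overwrite the 'result' parameter.

-- ===== PORT A =====
-- recursion over List Char (String.ofList at the end); the 'step < 0' branch is a totality
-- guard: there the Python recurses forever (RecursionError), outside Pre_helper.
def helperGoA (number : Int) (step : Int) : List Char :=
  if number ≤ 0 ∨ step = 0 then []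
  else if step < 0 then []
  else helperGoA (number - step) step ++ (',' :: ' ' :: PySem.Int.toChars number)
termination_by number.toNat
decreasing_by omega

def helper (number : Int) (step : Int) (result : String) : String :=
  String.ofList (helperGoA number step)

-- ===== PORT B =====
-- the while loop of Source B: collect number, number-step, … while positive
-- ('0 < step' is the same totality guard: Source B's loop never ends for step < 0).
def collectB (n : Int) (step : Int) : List Int :=
  if 0 < n ∧ 0 < step then n :: collectB (n - step) step else []
termination_by n.toNat
decreasing_by omega

def helper_alt (number : Int) (step : Int) (result : String) : String :=
  if number ≤ 0 ∨ step = 0 then ""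
  else String.ofList (',' :: ' ' ::
    PySem.Chars.join [',', ' '] (((collectB number step).reverse).map PySem.Int.toChars))

-- ===== PRECONDITION & SPEC =====
-- Pre_ excludes exactly number > 0 ∧ step < 0, where A never returns (RecursionError).
def Pre_helper (number : Int) (step : Int) (result : String) : Prop := number ≤ 0 ∨ 0 ≤ step
instance (number : Int) (step : Int) (result : String) : Decidable (Pre_helper number step result) := by unfold Pre_helper; infer_instance
def pvWitness_helper : Int × Int × String := (10, 3, "")

def Spec_helper (number : Int) (step : Int) (result : String) (out : String) : Prop := out = helper_alt number step result
instance (number : Int) (step : Int) (result : String) (out : String) : Decidable (Spec_helper number step result out) := by unfold Spec_helper; infer_instance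

-- ===== CLAIM (what is proved, stated in full; the proofs are below) =====
def Claim_equal_helper : Prop := ∀ (number : Int) (step : Int) (result : String), Dom_helper number step result → Pre_helper number step result → Spec_helper number step result (helper number step result)

-- ===== LEMMAS AND PROOFS =====

lemma helperGoA_eq_flat (step : Int) (hs : 0 < step) : ∀ (number : Int),
    helperGoA number step =
      ((collectB number step).reverse).flatMap (fun v => ',' :: ' ' :: PySem.Int.toChars v) := by
  have H : ∀ (k : Nat) (n : Int), n.toNat ≤ k →
      helperGoA n step =
        ((collectB n step).reverse).flatMap (fun v => ',' :: ' ' :: PySem.Int.toChars v) := by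
    intro k
    induction k with
    | zero =>
      intro n hn
      have h0 : n ≤ 0 := by omega
      rw [helperGoA, collectB]
      simp [h0, show ¬ (0 < n ∧ 0 < step) by omega]
    | succ k ih =>
      intro n hn
      by_cases hg : n ≤ 0 ∨ step = 0
      · have h0 : n ≤ 0 := by rcases hg with h | h <;> omega
        rw [helperGoA, collectB]
        simp [hg, show ¬ (0 < n ∧ 0 < step) by omega]
      · have h2 : ¬ step < 0 := by omega
        rw [helperGoA, collectB]
        rw [if_neg hg, if_neg h2, if_pos (show 0 < n ∧ 0 < step by omega)]
        rw [ih (n - step) (by omega)]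
        simp [List.flatMap_append]
  exact fun n => H n.toNat n le_rfl

lemma join_flat : ∀ (l : List Int), l ≠ [] →
    l.flatMap (fun v => ',' :: ' ' :: PySem.Int.toChars v) =
      ',' :: ' ' :: PySem.Chars.join [',', ' '] (l.map PySem.Int.toChars) := by
  intro l
  induction l with
  | nil => intro h; exact absurd rfl h
  | cons x xs ih =>
    intro _
    cases xs with
    | nil => simp [PySem.Chars.join_singleton]
    | cons y ys =>
      simp only [List.flatMap_cons, List.map_cons, PySem.Chars.join_cons_cons,
        ih (by simp)]
      simp

-- ===== VERDICT (by name: the statement is the Claim_ definition above) =====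
theorem helper_spec : Claim_equal_helper := by
  intro number step result _ hpre
  unfold Spec_helper helper helper_alt
  by_cases hg : number ≤ 0 ∨ step = 0
  · rw [helperGoA]
    simp [hg]
  · have hs : 0 < step := by
      rcases hpre with h | h <;> omega
    have hn : 0 < number := by omega
    rw [if_neg hg, helperGoA_eq_flat step hs number]
    have hne : (collectB number step).reverse ≠ [] := by
      rw [collectB, if_pos ⟨hn, hs⟩]; simp
    rw [join_flat _ hne, List.map_reverse]
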